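-- pv_equiv track=rewrite | github.com/starlab-unist/TTA | langgraph/generate_test_java.py | align_triplets
-- ===== SOURCE A (Python) =====
-- from typing import TypedDict, Optional, Dict, Any, List, Tuple
--
-- def align_triplets(
--     source_map: Dict[int, str],
--     transform_map: Dict[int, str],
--     test_map: Dict[int, str],
-- ) -> List[Tuple[int, str, str, str]]:
--
--     common = sorted(set(source_map.keys()) & set(transform_map.keys()) & set(test_map.keys()))
--     out: List[Tuple[int, str, str, str]] = []
--     for i in common:
--         out.append((i, source_map[i], transform_map[i], test_map[i]))
--     return out
-- ===== SOURCE B (Python) =====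
-- def align_triplets(source_map, transform_map, test_map):
--     # Three-pointer merge over the three sorted key lists (no set intersection):
--     # advance past the minimum key(s); emit a triple when all three heads agree.
--     sk, tk, uk = sorted(source_map), sorted(transform_map), sorted(test_map)
--     out = []
--     i = j = k = 0
--     while i < len(sk) and j < len(tk) and k < len(uk):
--         a, b, c = sk[i], tk[j], uk[k]
--         if a == b == c:
--             out.append((a, source_map[a], transform_map[a], test_map[a]))
--             i += 1; j += 1; k += 1
--         else:
--             m = min(a, b, c)
--             if a == m: i += 1
--             if b == m: j += 1
--             if c == m: k += 1
--     return out
-- ===== Notes on version B (the rewrite author's own statement) =====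
-- stated objective: alternative
-- what changed: B builds no key sets and performs no intersection: it sorts the three key lists and runs a three-pointer merge scan, advancing past the minimum head and emitting a triple whenever all three heads coincide.
import Mathlib
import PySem

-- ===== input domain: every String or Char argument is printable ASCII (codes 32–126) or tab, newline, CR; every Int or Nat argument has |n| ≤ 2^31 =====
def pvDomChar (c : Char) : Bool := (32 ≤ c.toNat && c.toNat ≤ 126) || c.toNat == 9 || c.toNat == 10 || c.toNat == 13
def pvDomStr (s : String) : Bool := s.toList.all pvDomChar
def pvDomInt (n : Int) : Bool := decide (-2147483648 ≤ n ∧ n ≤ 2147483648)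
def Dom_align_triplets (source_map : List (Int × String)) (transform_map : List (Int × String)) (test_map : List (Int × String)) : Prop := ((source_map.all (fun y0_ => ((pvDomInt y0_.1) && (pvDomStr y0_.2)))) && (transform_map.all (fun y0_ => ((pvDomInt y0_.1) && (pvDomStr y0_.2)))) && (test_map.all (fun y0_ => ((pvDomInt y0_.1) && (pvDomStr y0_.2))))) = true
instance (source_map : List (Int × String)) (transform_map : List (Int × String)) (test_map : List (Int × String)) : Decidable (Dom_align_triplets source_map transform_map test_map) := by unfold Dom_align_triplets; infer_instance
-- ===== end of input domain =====

-- B replaces A's key-set intersection by a three-pointer merge scan over the three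
-- independently sorted key lists (objective: alternative algorithm, similar cost).

-- ===== PORT A =====
def align_triplets (source_map : List (Int × String)) (transform_map : List (Int × String)) (test_map : List (Int × String)) : List (Int × String × String × String) :=
  let sd := PySem.Dict.ofList source_map
  let td := PySem.Dict.ofList transform_map
  let ud := PySem.Dict.ofList test_map
  let common := PySem.List.sorted
    (PySem.Set.inter (PySem.Set.inter (PySem.Set.ofList sd.keys) (PySem.Set.ofList td.keys)) (PySem.Set.ofList ud.keys))
    (fun x => x) false
  -- for i ∈ common each lookup is `some`; `.getD ""` only totalises (no KeyError possible)
  common.foldl (fun out i => out ++ [(i, (sd.get? i).getD "", (td.get? i).getD "", (ud.get? i).getD "")]) []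

-- ===== PORT B =====
-- B's while loop over indices i,j,k, ported as recursion on the three suffixes sk[i:], tk[j:], uk[k:]
def pvMerge3 {α : Type} (f : Int → α) : List Int → List Int → List Int → List α
  | [], _, _ => []
  | _ :: _, [], _ => []
  | _ :: _, _ :: _, [] => []
  | a :: as, b :: bs, c :: cs =>
    if a = b ∧ b = c then
      f a :: pvMerge3 f as bs cs
    else
      pvMerge3 f
        (if a = min a (min b c) then as else a :: as)
        (if b = min a (min b c) then bs else b :: bs)
        (if c = min a (min b c) then cs else c :: cs)
termination_by xs ys zs => xs.length + ys.length + zs.length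
decreasing_by
  · simp only [List.length_cons]; omega
  · split_ifs with hA hB hC <;> simp only [List.length_cons] <;> omega

def align_triplets_alt (source_map : List (Int × String)) (transform_map : List (Int × String)) (test_map : List (Int × String)) : List (Int × String × String × String) :=
  let sd := PySem.Dict.ofList source_map
  let td := PySem.Dict.ofList transform_map
  let ud := PySem.Dict.ofList test_map
  pvMerge3
    (fun i => (i, (sd.get? i).getD "", (td.get? i).getD "", (ud.get? i).getD ""))
    (PySem.List.sorted sd.keys (fun x => x) false)
    (PySem.List.sorted td.keys (fun x => x) false)
    (PySem.List.sorted ud.keys (fun x => x) false)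

-- ===== PRECONDITION & SPEC =====
def Spec_align_triplets (source_map : List (Int × String)) (transform_map : List (Int × String)) (test_map : List (Int × String)) (out : List (Int × String × String × String)) : Prop := out = align_triplets_alt source_map transform_map test_map
instance (source_map : List (Int × String)) (transform_map : List (Int × String)) (test_map : List (Int × String)) (out : List (Int × String × String × String)) : Decidable (Spec_align_triplets source_map transform_map test_map out) := by unfold Spec_align_triplets; infer_instance

-- ===== CLAIM (what is proved, stated in full; the proofs are below) =====
def Claim_equal_align_triplets : Prop := ∀ (source_map : List (Int × String)) (transform_map : List (Int × String)) (test_map : List (Int × String)), Dom_align_triplets source_map transform_map test_map → Spec_align_triplets source_map transform_map test_map (align_triplets source_map transform_map test_map)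

-- ===== LEMMAS AND PROOFS =====

/-- A's append loop is `acc ++ map f`. -/
theorem pv_foldl_append_map {α β : Type} (f : α → β) :
    ∀ (l : List α) (acc : List β),
      l.foldl (fun out i => out ++ [f i]) acc = acc ++ l.map f := by
  intro l
  induction l with
  | nil => intro acc; simp
  | cons a l ih => intro acc; simp [List.foldl, ih]

/-- In a strictly sorted list with head `b`, membership of `a ≤ b` forces `a = b`. -/
theorem pv_mem_sorted_head {a b : Int} {bs : List Int}
    (hs : (b :: bs).Pairwise (· < ·)) (hab : a ≤ b) (hm : a ∈ b :: bs) : a = b := by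
  rcases List.mem_cons.mp hm with h | h
  · exact h
  · have := (List.pairwise_cons.mp hs).1 a h
    omega

/-- Dropping a head no element of `l` equals does not change the filter (left slot). -/
theorem pv_filter_drop_left (l : List Int) (b : Int) (bs zs : List Int)
    (h : ∀ x ∈ l, x ≠ b) :
    l.filter (fun x => decide (x ∈ b :: bs ∧ x ∈ zs))
      = l.filter (fun x => decide (x ∈ bs ∧ x ∈ zs)) := by
  apply List.filter_congr
  intro x hx
  simp [List.mem_cons, h x hx]

/-- Dropping a head no element of `l` equals does not change the filter (right slot). -/
theorem pv_filter_drop_right (l : List Int) (c : Int) (ys cs : List Int)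
    (h : ∀ x ∈ l, x ≠ c) :
    l.filter (fun x => decide (x ∈ ys ∧ x ∈ c :: cs))
      = l.filter (fun x => decide (x ∈ ys ∧ x ∈ cs)) := by
  apply List.filter_congr
  intro x hx
  simp [List.mem_cons, h x hx]

/-- The three-pointer merge of strictly sorted lists is the membership filter of the first. -/
theorem pv_merge3_eq {α : Type} (f : Int → α) :
    ∀ (xs ys zs : List Int), xs.Pairwise (· < ·) → ys.Pairwise (· < ·) → zs.Pairwise (· < ·) →
      pvMerge3 f xs ys zs
        = (xs.filter (fun x => decide (x ∈ ys ∧ x ∈ zs))).map f := by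
  intro xs ys zs
  induction xs, ys, zs using pvMerge3.induct with
  | case1 ys zs => intro _ _ _; simp [pvMerge3]
  | case2 a as zs => intro _ _ _; simp [pvMerge3]
  | case3 a as b bs => intro _ _ _; simp [pvMerge3]
  | case4 a as b bs c cs heq ih =>
    -- equal heads
    intro hx hy hz
    obtain ⟨hab, hbc⟩ := heq
    subst hab; subst hbc
    have hstep : pvMerge3 f (a :: as) (a :: bs) (a :: cs) = f a :: pvMerge3 f as bs cs := by
      rw [pvMerge3]; simp
    rw [hstep]
    have hgt : ∀ x ∈ as, x ≠ a := by
      intro x hmem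
      have := (List.pairwise_cons.mp hx).1 x hmem
      omega
    have h1 : as.filter (fun x => decide (x ∈ a :: bs ∧ x ∈ a :: cs))
        = as.filter (fun x => decide (x ∈ bs ∧ x ∈ cs)) := by
      rw [pv_filter_drop_left _ _ _ _ hgt, pv_filter_drop_right _ _ _ _ hgt]
    have hhead : (a :: as).filter (fun x => decide (x ∈ a :: bs ∧ x ∈ a :: cs))
        = a :: as.filter (fun x => decide (x ∈ a :: bs ∧ x ∈ a :: cs)) := by
      simp
    rw [hhead, h1, List.map_cons,
        ih hx.of_cons hy.of_cons hz.of_cons]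
  | case5 a as b bs c cs hne ih =>
    -- unequal heads: drop every head equal to the minimum
    intro hx hy hz
    rw [pvMerge3]
    rw [if_neg hne]
    set m := min a (min b c) with hm
    simp only [dite_eq_ite] at ih
    have hma : m ≤ a := min_le_left _ _
    have hmb : m ≤ b := le_trans (min_le_right _ _) (min_le_left _ _)
    have hmc : m ≤ c := le_trans (min_le_right _ _) (min_le_right _ _)
    -- Step 1: the reduced first list
    have hxs' : (if a = m then as else a :: as).Pairwise (· < ·) := by
      split_ifs
      · exact hx.of_cons
      · exact hx
    have hys' : (if b = m then bs else b :: bs).Pairwise (· < ·) := by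
      split_ifs
      · exact hy.of_cons
      · exact hy
    have hzs' : (if c = m then cs else c :: cs).Pairwise (· < ·) := by
      split_ifs
      · exact hz.of_cons
      · exact hz
    rw [ih hxs' hys' hzs']
    -- every element of the reduced first list is > m
    have hgt : ∀ x ∈ (if a = m then as else a :: as), m < x := by
      intro x hmem
      split_ifs at hmem with ha
      · have := (List.pairwise_cons.mp hx).1 x hmem
        omega
      · rcases List.mem_cons.mp hmem with h | h
        · subst h; omega
        · have := (List.pairwise_cons.mp hx).1 x h
          omega
    -- replace the second and third lists in the filter
    have h2 : ∀ (l : List Int), (∀ x ∈ l, m < x) →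
        l.filter (fun x => decide (x ∈ b :: bs ∧ x ∈ c :: cs))
          = l.filter (fun x => decide (x ∈ (if b = m then bs else b :: bs) ∧ x ∈ (if c = m then cs else c :: cs))) := by
      intro l hl
      apply List.filter_congr
      intro x hmem
      have hxm := hl x hmem
      split_ifs with hb hc hc
      · simp [List.mem_cons, (show x ≠ b by omega), (show x ≠ c by omega)]
      · simp [List.mem_cons, (show x ≠ b by omega)]
      · simp [List.mem_cons, (show x ≠ c by omega)]
      · rfl
    -- relate filter of (a :: as) with filter of the reduced first list
    by_cases ha : a = m
    · -- a is the minimum: a is not in both other lists, so it is filtered out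
      have hnot : ¬ (a ∈ b :: bs ∧ a ∈ c :: cs) := by
        rintro ⟨hbmem, hcmem⟩
        have h1 := pv_mem_sorted_head hy (by omega) hbmem
        have h2 := pv_mem_sorted_head hz (by omega) hcmem
        exact hne ⟨h1, by omega⟩
      have hh : (a :: as).filter (fun x => decide (x ∈ b :: bs ∧ x ∈ c :: cs))
          = as.filter (fun x => decide (x ∈ b :: bs ∧ x ∈ c :: cs)) := by
        rw [List.filter_cons_of_neg (by simpa using hnot)]
      rw [hh, h2 as (by simpa [ha] using hgt), if_pos ha]
      rfl
    · rw [h2 (a :: as) (by simpa [ha] using hgt)]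
      simp [ha]

theorem align_triplets_spec_aux (source_map transform_map test_map : List (Int × String)) :
    align_triplets source_map transform_map test_map
      = align_triplets_alt source_map transform_map test_map := by
  unfold align_triplets align_triplets_alt
  set sd := PySem.Dict.ofList source_map with hsd
  set td := PySem.Dict.ofList transform_map with htd
  set ud := PySem.Dict.ofList test_map with hud
  set f : Int → Int × String × String × String :=
    fun i => (i, (sd.get? i).getD "", (td.get? i).getD "", (ud.get? i).getD "") with hf
  have hnodupS : sd.keys.Nodup := PySem.Dict.nodup_keys_ofList _
  have hS : PySem.Set.ofList sd.keys = sd.keys := PySem.Set.ofList_eq_self_of_nodup _ hnodupS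
  -- strict sortedness of the three sorted key lists
  have strict : ∀ d : PySem.Dict Int String, d.keys.Nodup →
      (PySem.List.sorted d.keys (fun x => x) false).Pairwise (· < ·) := by
    intro d hnd0
    have hle := PySem.List.sorted_pairwise d.keys (fun x => x)
    have hnd : (PySem.List.sorted d.keys (fun x => x) false).Nodup :=
      (PySem.List.sorted_perm d.keys (fun x => x) false).nodup_iff.mpr hnd0
    exact (hle.and hnd).imp (fun h => lt_of_le_of_ne h.1 h.2)
  rw [pv_foldl_append_map, List.nil_append,
      pv_merge3_eq f _ _ _ (strict sd hnodupS) (strict td (PySem.Dict.nodup_keys_ofList _)) (strict ud (PySem.Dict.nodup_keys_ofList _))]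
  congr 1
  -- sorted intersection = sorted source keys filtered by membership in the other sorted key lists
  apply PySem.List.sorted_eq_of_perm_of_pairwise_lt
  · -- permutation
    have hnodupI : (PySem.Set.inter (PySem.Set.inter (PySem.Set.ofList sd.keys) (PySem.Set.ofList td.keys)) (PySem.Set.ofList ud.keys)).Nodup := by
      apply PySem.Set.nodup_inter
      apply PySem.Set.nodup_inter
      rw [hS]; exact hnodupS
    have hnodupF : ((PySem.List.sorted sd.keys (fun x => x) false).filter
        (fun x => decide (x ∈ PySem.List.sorted td.keys (fun x => x) false ∧ x ∈ PySem.List.sorted ud.keys (fun x => x) false))).Nodup := by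
      apply List.Nodup.filter
      exact (PySem.List.sorted_perm sd.keys (fun x => x) false).nodup_iff.mpr hnodupS
    rw [List.perm_ext_iff_of_nodup hnodupF hnodupI]
    intro a
    simp [List.mem_filter, PySem.List.mem_sorted, PySem.Set.mem_inter, PySem.Set.mem_ofList, and_assoc]
  · -- strictly increasing
    exact (strict sd hnodupS).filter _

-- ===== VERDICT (by name: the statement is the Claim_ definition above) =====
theorem align_triplets_spec : Claim_equal_align_triplets := by
  intro s t u _
  unfold Spec_align_triplets
  exact align_triplets_spec_aux s t u
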